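-- pv_equiv track=rewrite | github.com/wadelab/opm-source-toolbox | src/opm_source_toolbox/core.py | select_names
-- ===== SOURCE A (Python) =====
-- from typing import Iterable, Iterator, List, Optional, Sequence, Tuple
--
-- def select_names(
--     names: Sequence[str],
--     include_patterns: Optional[Sequence[str]] = None,
--     exclude_patterns: Optional[Sequence[str]] = None,
-- ) -> List[int]:
--     include = [pattern.lower() for pattern in (include_patterns or []) if pattern]
--     exclude = [pattern.lower() for pattern in (exclude_patterns or []) if pattern]
--     idxs: List[int] = []
--     for idx, name in enumerate(names):
--         lowered = str(name).lower()
--         if include and not any(pattern in lowered for pattern in include):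
--             continue
--         if exclude and any(pattern in lowered for pattern in exclude):
--             continue
--         idxs.append(idx)
--     return idxs
-- ===== SOURCE B (Python) =====
-- def select_names(names, include_patterns=None, exclude_patterns=None):
--     include = [p.lower() for p in (include_patterns or []) if p]
--     exclude = [p.lower() for p in (exclude_patterns or []) if p]
--     lowered = [str(n).lower() for n in names]
--     if include:
--         keep = {i for i, s in enumerate(lowered) if any(p in s for p in include)}
--     else:
--         keep = set(range(len(names)))
--     if exclude:
--         drop = {i for i, s in enumerate(lowered) if any(p in s for p in exclude)}
--     else:
--         drop = set()
--     return [i for i in range(len(names)) if i in keep and i not in drop]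
-- ===== Notes on version B (the rewrite author's own statement) =====
-- stated objective: alternative
-- what changed: B replaces A's single streaming loop (enumerate + continue guards) by three independent passes: it builds a 'keep' index set from the include patterns and a 'drop' index set from the exclude patterns, then filters range(len(names)) by set membership.
import Mathlib
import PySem

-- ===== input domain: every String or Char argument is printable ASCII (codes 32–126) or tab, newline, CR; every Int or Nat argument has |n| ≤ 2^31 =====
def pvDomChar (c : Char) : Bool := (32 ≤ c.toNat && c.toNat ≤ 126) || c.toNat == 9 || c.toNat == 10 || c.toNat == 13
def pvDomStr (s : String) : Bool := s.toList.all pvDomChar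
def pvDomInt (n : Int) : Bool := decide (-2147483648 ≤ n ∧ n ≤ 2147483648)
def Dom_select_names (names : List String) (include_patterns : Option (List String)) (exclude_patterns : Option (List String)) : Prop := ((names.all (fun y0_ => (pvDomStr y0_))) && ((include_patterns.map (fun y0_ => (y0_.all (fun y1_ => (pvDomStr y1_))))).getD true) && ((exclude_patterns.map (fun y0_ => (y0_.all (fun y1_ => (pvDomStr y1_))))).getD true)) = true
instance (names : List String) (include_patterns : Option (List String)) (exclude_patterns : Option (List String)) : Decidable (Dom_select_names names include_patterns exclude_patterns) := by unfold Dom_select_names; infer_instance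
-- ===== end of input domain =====

-- B rebuilds the selection as keep/drop index sets plus a range filter instead of A's single enumerate loop (alternative decomposition, same cost).


-- ===== PORT A =====
def select_names (names : List String) (include_patterns : Option (List String)) (exclude_patterns : Option (List String)) : List Int :=
  let include_ := ((include_patterns.getD []).filter (fun p => !(p == ""))).map PySem.Str.lower
  let exclude_ := ((exclude_patterns.getD []).filter (fun p => !(p == ""))).map PySem.Str.lower
  (PySem.List.enumerate names 0).foldl (fun idxs q =>
    let lowered := PySem.Str.lower q.2
    if !include_.isEmpty && !(include_.any (fun p => PySem.Str.isIn p lowered)) then idxs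
    else if !exclude_.isEmpty && exclude_.any (fun p => PySem.Str.isIn p lowered) then idxs
    else idxs ++ [q.1]) []

-- ===== PORT B =====
def select_names_alt (names : List String) (include_patterns : Option (List String)) (exclude_patterns : Option (List String)) : List Int :=
  let include_ := ((include_patterns.getD []).filter (fun p => !(p == ""))).map PySem.Str.lower
  let exclude_ := ((exclude_patterns.getD []).filter (fun p => !(p == ""))).map PySem.Str.lower
  let lowered := names.map PySem.Str.lower
  let keep : PySem.Set Int :=
    if !include_.isEmpty then
      PySem.Set.ofList (((PySem.List.enumerate lowered 0).filter
        (fun q => include_.any (fun p => PySem.Str.isIn p q.2))).map (fun q => q.1))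
    else PySem.Set.ofList (PySem.List.pyRange 0 names.length 1)
  let drop : PySem.Set Int :=
    if !exclude_.isEmpty then
      PySem.Set.ofList (((PySem.List.enumerate lowered 0).filter
        (fun q => exclude_.any (fun p => PySem.Str.isIn p q.2))).map (fun q => q.1))
    else PySem.Set.empty
  (PySem.List.pyRange 0 names.length 1).filter
    (fun i => PySem.Set.contains keep i && !(PySem.Set.contains drop i))

-- ===== PRECONDITION & SPEC =====
def Spec_select_names (names : List String) (include_patterns : Option (List String)) (exclude_patterns : Option (List String)) (out : List Int) : Prop := out = select_names_alt names include_patterns exclude_patterns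
instance (names : List String) (include_patterns : Option (List String)) (exclude_patterns : Option (List String)) (out : List Int) : Decidable (Spec_select_names names include_patterns exclude_patterns out) := by unfold Spec_select_names; infer_instance

-- ===== CLAIM (what is proved, stated in full; the proofs are below) =====
def Claim_equal_select_names : Prop := ∀ (names : List String) (include_patterns : Option (List String)) (exclude_patterns : Option (List String)), Dom_select_names names include_patterns exclude_patterns → Spec_select_names names include_patterns exclude_patterns (select_names names include_patterns exclude_patterns)

-- ===== LEMMAS AND PROOFS =====

-- A's per-name keep condition, as one boolean
def pvCondA (inc exc : List String) (s : String) : Bool :=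
  !(!inc.isEmpty && !(inc.any (fun p => PySem.Str.isIn p s))) &&
  !(!exc.isEmpty && exc.any (fun p => PySem.Str.isIn p s))

-- A's fold is a filter of the index range
lemma pv_foldA (inc exc : List String) (names : List String) :
    (PySem.List.enumerate names).foldl (fun idxs q =>
      let lowered := PySem.Str.lower q.2
      if !inc.isEmpty && !(inc.any (fun p => PySem.Str.isIn p lowered)) then idxs
      else if !exc.isEmpty && exc.any (fun p => PySem.Str.isIn p lowered) then idxs
      else idxs ++ [q.1]) [] =
    (PySem.List.pyRange 0 (PySem.List.len names)).filter
      (fun j => pvCondA inc exc (PySem.Str.lower (PySem.List.pyGetD names j ""))) := by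
  have hfun : (fun (idxs : List Int) (q : Int × String) =>
      let lowered := PySem.Str.lower q.2
      if !inc.isEmpty && !(inc.any (fun p => PySem.Str.isIn p lowered)) then idxs
      else if !exc.isEmpty && exc.any (fun p => PySem.Str.isIn p lowered) then idxs
      else idxs ++ [q.1])
      = fun idxs q => if pvCondA inc exc (PySem.Str.lower q.2) then idxs ++ [q.1] else idxs := by
    funext idxs q
    simp only [pvCondA]
    obtain h1 | h1 := Bool.eq_false_or_eq_true
        (!inc.isEmpty && !(inc.any fun p => PySem.Str.isIn p (PySem.Str.lower q.2))) <;>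
      obtain h2 | h2 := Bool.eq_false_or_eq_true
        (!exc.isEmpty && exc.any fun p => PySem.Str.isIn p (PySem.Str.lower q.2)) <;>
      simp only [h1, h2] <;> simp
  rw [hfun, PySem.List.foldl_append_if, PySem.List.enumerate_eq_map_pyRange names "",
    List.filter_map]
  simp [List.map_map, Function.comp_def]

-- B's keep/drop source list is the same filter of the index range
lemma pv_setlist (pats : List String) (names : List String) :
    ((PySem.List.enumerate (names.map PySem.Str.lower)).filter
        (fun q => pats.any (fun p => PySem.Str.isIn p q.2))).map (fun q => q.1)
    = (PySem.List.pyRange 0 (PySem.List.len names)).filter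
        (fun j => pats.any (fun p => PySem.Str.isIn p
            (PySem.Str.lower (PySem.List.pyGetD names j "")))) := by
  rw [PySem.List.enumerate_eq_map_pyRange (names.map PySem.Str.lower) (PySem.Str.lower ""),
    List.filter_map]
  have hlen : PySem.List.len (names.map PySem.Str.lower) = PySem.List.len names := by
    simp [PySem.List.len]
  rw [hlen]
  simp [List.map_map, Function.comp_def, PySem.List.pyGetD_map]

-- the two filters of the index range agree pointwise
lemma pv_main (inc exc : List String) (names : List String) :
    (PySem.List.pyRange 0 (PySem.List.len names)).filter
      (fun j => pvCondA inc exc (PySem.Str.lower (PySem.List.pyGetD names j ""))) =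
    (PySem.List.pyRange 0 (PySem.List.len names)).filter (fun i =>
      (if !inc.isEmpty then
          PySem.Set.ofList ((PySem.List.pyRange 0 (PySem.List.len names)).filter
            (fun j => inc.any (fun p => PySem.Str.isIn p (PySem.Str.lower (PySem.List.pyGetD names j "")))))
        else PySem.Set.ofList (PySem.List.pyRange 0 (PySem.List.len names))).contains i &&
      !((if !exc.isEmpty then
          PySem.Set.ofList ((PySem.List.pyRange 0 (PySem.List.len names)).filter
            (fun j => exc.any (fun p => PySem.Str.isIn p (PySem.Str.lower (PySem.List.pyGetD names j "")))))
        else PySem.Set.empty).contains i)) := by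
  refine List.filter_congr ?_
  intro j hj
  rw [PySem.List.mem_pyRange_one] at hj
  obtain ⟨hj0, hj1⟩ := hj
  rw [PySem.List.len] at hj1
  obtain hinc | hinc := Bool.eq_false_or_eq_true inc.isEmpty <;>
    obtain hexc | hexc := Bool.eq_false_or_eq_true exc.isEmpty <;>
      (rw [Bool.eq_iff_iff]
       simp [pvCondA, hinc, hexc, hj0, hj1, PySem.List.len, PySem.Set.empty,
         PySem.Set.mem_ofList, List.mem_filter, PySem.List.mem_pyRange_one])

-- ===== VERDICT (by name: the statement is the Claim_ definition above) =====
theorem select_names_spec : Claim_equal_select_names := by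
  intro names ip ep _
  unfold Spec_select_names select_names select_names_alt
  dsimp only
  rw [pv_foldA, pv_setlist, pv_setlist]
  have hlen : ((names.length : Int)) = PySem.List.len names := by simp [PySem.List.len]
  rw [hlen, pv_main]
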